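-- pv_equiv track=rewrite | github.com/PeteHeckel/AdventOfCode | day12/day12.py | find_potential_places
-- ===== SOURCE A (Python) =====
-- def find_potential_places( springs:str, broken_len:int ):
--     broken_spring = '#'
--     unknown_spuring = '?'
--     good_spring = '.'
--
--     spring_count = len(springs)
--     # Add tailing valid spring to avoid out of bounds checks later
--     springs = springs + '.'
--
--     if broken_len > spring_count:
--         return []
--
--     last_start = springs.find(broken_spring)
--
--     if last_start == -1 or last_start > (spring_count - broken_len):
--         last_start = spring_count - broken_len
--
--     assert(last_start >= 0)
--
--     potential_starts = []
--
--     for i in range(last_start):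
--         check_range = springs[i:(i+broken_len)]
--         next_spring = springs[i+broken_len]
--         if '.' not in check_range and next_spring != '#':
--             potential_starts.append(i)
--
--     return potential_starts
-- ===== SOURCE B (Python) =====
-- def find_potential_places(springs, broken_len):
--     n = len(springs)
--     if broken_len > n:
--         return []
--     s = springs + '.'
--     j = s.find('#')
--     last_start = n - broken_len if (j == -1 or j > n - broken_len) else j
--     # prefix counts of '.' : pref[k] = number of '.' in s[:k]
--     pref = [0]
--     acc = 0
--     for c in s:
--         acc += (c == '.')
--         pref.append(acc)
--     return [i for i in range(last_start)
--             if pref[i + broken_len] == pref[i] and s[i + broken_len] != '#']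
-- ===== Notes on version B (the rewrite author's own statement) =====
-- stated objective: faster
-- what changed: B replaces A's per-position substring slice-and-scan ('.' in springs[i:i+broken_len]) by a single prefix-sum pass counting '.', so each window test is an O(1) comparison of two prefix counts.
-- outside the precondition, e.g. on find_potential_places('??', -1): A returns [0, 1, 2], B returns [1, 2]
import Mathlib
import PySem

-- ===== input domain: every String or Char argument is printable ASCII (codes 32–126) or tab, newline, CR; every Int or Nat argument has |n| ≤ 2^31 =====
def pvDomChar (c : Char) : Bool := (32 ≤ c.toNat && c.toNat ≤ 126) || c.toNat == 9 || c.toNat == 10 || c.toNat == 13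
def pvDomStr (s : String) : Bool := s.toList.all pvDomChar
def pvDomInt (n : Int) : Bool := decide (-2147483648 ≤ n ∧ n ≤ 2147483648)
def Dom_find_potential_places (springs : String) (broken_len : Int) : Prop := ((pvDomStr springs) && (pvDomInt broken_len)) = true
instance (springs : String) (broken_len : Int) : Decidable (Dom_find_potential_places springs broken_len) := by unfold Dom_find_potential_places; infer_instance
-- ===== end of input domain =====

-- B replaces A's per-position substring scan by a prefix-sum count of '.' (O(1) window test, one O(n) pass);
-- equivalence is claimed for broken_len ≥ 0 (return value only).

-- ===== PORT A =====
def find_potential_places (springs : String) (broken_len : Int) : List Int :=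
  let spring_count : Int := PySem.Str.len springs
  let s2 : List Char := springs.toList ++ ['.']          -- springs = springs + '.'
  if broken_len > spring_count then []
  else
    let last_start0 := PySem.Chars.find s2 ['#']
    let last_start :=
      if last_start0 = -1 ∨ last_start0 > spring_count - broken_len
      then spring_count - broken_len else last_start0
    (PySem.List.pyRange 0 last_start 1).foldl
      (fun acc i =>
        let check_range := PySem.List.slice s2 (some i) (some (i + broken_len))
        let next_spring := PySem.List.pyGetD s2 (i + broken_len) ' '   -- in range on Pre_
        if (!PySem.Chars.isIn ['.'] check_range) && (next_spring != '#')
        then acc ++ [i] else acc)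
      []

-- ===== PORT B =====
def find_potential_places_alt (springs : String) (broken_len : Int) : List Int :=
  let n : Int := PySem.Str.len springs
  if broken_len > n then []
  else
    let s : List Char := springs.toList ++ ['.']
    let j := PySem.Chars.find s ['#']
    let last_start := if j = -1 ∨ j > n - broken_len then n - broken_len else j
    -- pref[k] = number of '.' among the first k chars of s
    let st := s.foldl
      (fun (st : List Int × Int) c =>
        let acc := st.2 + (if c = '.' then 1 else 0)
        (st.1 ++ [acc], acc))
      ([(0 : Int)], (0 : Int))
    let pref := st.1
    (PySem.List.pyRange 0 last_start 1).filter
      (fun i =>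
        (PySem.List.pyGetD pref (i + broken_len) 0 == PySem.List.pyGetD pref i 0) &&
        (PySem.List.pyGetD s (i + broken_len) ' ' != '#'))

-- ===== PRECONDITION & SPEC =====
-- Pre_ excludes negative broken_len (outside the task's natural domain): there A's negative slice bounds
-- and negative next-spring index wrap around Python-style, giving accidental results or an IndexError.
def Pre_find_potential_places (_springs : String) (broken_len : Int) : Prop := 0 ≤ broken_len
instance (springs : String) (broken_len : Int) : Decidable (Pre_find_potential_places springs broken_len) := by unfold Pre_find_potential_places; infer_instance
def pvWitness_find_potential_places : String × Int := ("?#?.??#", 2)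

def Spec_find_potential_places (springs : String) (broken_len : Int) (out : List Int) : Prop := out = find_potential_places_alt springs broken_len
instance (springs : String) (broken_len : Int) (out : List Int) : Decidable (Spec_find_potential_places springs broken_len out) := by unfold Spec_find_potential_places; infer_instance

-- ===== CLAIM (what is proved, stated in full; the proofs are below) =====
def Claim_equal_find_potential_places : Prop := ∀ (springs : String) (broken_len : Int), Dom_find_potential_places springs broken_len → Pre_find_potential_places springs broken_len → Spec_find_potential_places springs broken_len (find_potential_places springs broken_len)

-- ===== LEMMAS AND PROOFS =====

-- the prefix-sum fold of B, characterised: it produces the list of '.'-counts of all prefixes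
def pvCnt (t : List Char) : Nat := t.countP (· = '.')

theorem pv_fold_pref (cs : List Char) (p : List Int) (a : Int) :
    cs.foldl
      (fun (st : List Int × Int) c =>
        let acc := st.2 + (if c = '.' then 1 else 0)
        (st.1 ++ [acc], acc))
      (p, a)
    = (p ++ (List.range cs.length).map (fun k => a + (pvCnt (cs.take (k+1)) : Int)),
       a + (pvCnt cs : Int)) := by
  induction cs generalizing p a with
  | nil => simp [pvCnt]
  | cons c cs ih =>
    simp only [List.foldl_cons, ih, List.length_cons, List.range_succ_eq_map, List.map_cons,
      List.map_map, List.take_succ_cons, List.take_zero, Prod.mk.injEq]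
    constructor
    · simp only [List.append_assoc, List.cons_append, List.nil_append, List.append_cancel_left_eq,
        List.cons.injEq]
      constructor
      · simp [pvCnt]
      · apply List.map_congr_left
        intro k _
        simp only [Function.comp_apply, pvCnt, List.countP_cons]
        by_cases h : c = '.' <;> simp [h] <;> omega
    · simp only [pvCnt, List.countP_cons]
      by_cases h : c = '.' <;> simp [h] <;> omega

theorem pv_pref_get (s : List Char) (i : Int) (h0 : 0 ≤ i) (h1 : i ≤ s.length) :
    PySem.List.pyGetD
      ([(0:Int)] ++ (List.range s.length).map (fun k => (0:Int) + (pvCnt (s.take (k+1)) : Int)))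
      i 0 = (pvCnt (s.take i.toNat) : Int) := by
  have hlen : ([(0:Int)] ++ (List.range s.length).map (fun k => (0:Int) + (pvCnt (s.take (k+1)) : Int))).length = s.length + 1 := by simp
  have hlt : i < (([(0:Int)] ++ (List.range s.length).map (fun k => (0:Int) + (pvCnt (s.take (k+1)) : Int))).length : Int) := by
    rw [hlen]; push_cast; omega
  rw [PySem.List.pyGetD_eq_getElem _ _ h0 hlt]
  rcases Nat.eq_zero_or_pos i.toNat with hz | hp
  · simp [hz, pvCnt]
  · have hi : i.toNat - 1 < s.length := by omega
    have : i.toNat = (i.toNat - 1) + 1 := by omega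
    rw [List.getElem_append_right (by simp; omega)]
    simp only [List.length_cons, List.length_nil]
    rw [List.getElem_map]
    rw [List.getElem_range]
    rw [this]
    simp

-- the window test: no '.' in s[i:i+L]  ↔  equal prefix counts at i and i+L
theorem pv_window (s : List Char) (a b : Nat) (_hab : a + b ≤ s.length) :
    (PySem.Chars.isIn ['.'] (PySem.List.slice s (some (a:Int)) (some ((a:Int) + (b:Int)))) = false)
      ↔ pvCnt (s.take (a + b)) = pvCnt (s.take a) := by
  rw [PySem.List.slice_natCast_add]
  rw [PySem.Chars.isIn_eq_false_iff]
  rw [List.singleton_infix_iff]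
  have htake : s.take (a + b) = s.take a ++ (s.drop a).take b := by
    rw [← List.take_add]
  rw [htake]
  simp only [pvCnt, List.countP_append]
  constructor
  · intro h
    have : ((s.drop a).take b).countP (· = '.') = 0 := by
      rw [List.countP_eq_zero]
      intro x hx
      simp only [decide_eq_true_eq]
      intro hxe; exact h (hxe ▸ hx)
    omega
  · intro h
    have hz : ((s.drop a).take b).countP (· = '.') = 0 := by omega
    rw [List.countP_eq_zero] at hz
    intro hmem
    have := hz _ hmem
    simp at this

-- ===== VERDICT (by name: the statement is the Claim_ definition above) =====
theorem find_potential_places_spec : Claim_equal_find_potential_places := by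
  intro springs broken_len _hdom hpre
  unfold Spec_find_potential_places find_potential_places find_potential_places_alt
  simp only [PySem.Str.len_eq]
  set cs := springs.toList with hcs
  set n : Int := (cs.length : Int) with hn
  by_cases hbig : broken_len > n
  · simp [hbig]
  · simp only [hbig, if_false]
    set s : List Char := cs ++ ['.'] with hs
    set j := PySem.Chars.find s ['#'] with hj
    set last_start := if j = -1 ∨ j > n - broken_len then n - broken_len else j with hls
    -- bounds on last_start
    have hj_bounds : -1 ≤ j ∧ j ≤ (s.length : Int) := ⟨PySem.Chars.neg_one_le_find s ['#'], PySem.Chars.find_le_length s ['#']⟩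
    have hls_nonneg : 0 ≤ last_start := by
      rw [hls]; split_ifs with h
      · omega
      · omega
    have hls_le : last_start ≤ n - broken_len := by
      rw [hls]; split_ifs with h
      · omega
      · omega
    -- rewrite B's prefix list
    rw [pv_fold_pref]
    -- A's loop as a filter
    rw [PySem.List.foldl_append_if
      (fun i => (!PySem.Chars.isIn ['.'] (PySem.List.slice s (some i) (some (i + broken_len)))) &&
                (PySem.List.pyGetD s (i + broken_len) ' ' != '#'))
      (fun i => i)]
    simp only [List.nil_append, List.map_id']
    apply List.filter_congr
    intro i hi
    rw [PySem.List.mem_pyRange_one] at hi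
    have hi0 : 0 ≤ i := hi.1
    have hiu : i < last_start := hi.2
    have hslen : (s.length : Int) = n + 1 := by
      show (((cs ++ ['.']).length : Nat) : Int) = ((cs.length : Nat) : Int) + 1
      simp [List.length_append]
    -- cast i and broken_len to naturals
    obtain ⟨a, ha⟩ : ∃ a : Nat, i = (a : Int) := ⟨i.toNat, (Int.toNat_of_nonneg hi0).symm⟩
    obtain ⟨b, hb⟩ : ∃ b : Nat, broken_len = (b : Int) := ⟨broken_len.toNat, (Int.toNat_of_nonneg hpre).symm⟩
    subst ha hb
    have habn : a + b ≤ s.length := by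
      have h1 : (a:Int) < last_start := hiu
      have h2 : last_start ≤ n - (b:Int) := hls_le
      have h3 : (s.length : Int) = n + 1 := hslen
      omega
    -- prefix lookups
    have hg1 := pv_pref_get s ((a:Int) + (b:Int)) (by positivity) (by omega)
    have hg2 := pv_pref_get s (a:Int) (by positivity) (by omega)
    have ht1 : ((a:Int) + (b:Int)).toNat = a + b := by omega
    have ht2 : ((a:Int)).toNat = a := by omega
    rw [ht1] at hg1
    rw [ht2] at hg2
    rw [hg1, hg2]
    -- the window equivalence
    have hw := pv_window s a b habn
    -- conclude Bool equality
    rcases hA : PySem.Chars.isIn ['.'] (PySem.List.slice s (some (a:Int)) (some ((a:Int) + (b:Int)))) with _ | _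
    · have := hw.mp hA
      simp [this]
    · have hne : pvCnt (s.take (a + b)) ≠ pvCnt (s.take a) := by
        intro h; have := hw.mpr h; rw [hA] at this; exact absurd this (by simp)
      have : ((pvCnt (s.take (a + b)) : Int) == (pvCnt (s.take a) : Int)) = false := by
        simp only [beq_eq_false_iff_ne, ne_eq]
        exact_mod_cast hne
      simp [this]
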